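-- pv_equiv track=rewrite | github.com/micwill755/qkllm | inference/vllm/chunked_prefill/chunked_prefill_demo.py | create_long_prompt
-- ===== SOURCE A (Python) =====
-- def create_long_prompt(target_tokens: int) -> str:
--     base_text = """
--     Please analyze the following business scenario in detail. Consider all aspects
--     including market conditions, competitive landscape, financial implications,
--     operational challenges, strategic opportunities, risk factors, and potential
--     outcomes. Provide a comprehensive analysis with specific recommendations.
--
--     The scenario involves a technology startup that has developed an innovative
--     AI-powered solution for healthcare diagnostics. The company has completed
--     initial testing and is now considering various go-to-market strategies.
--     """
--
--     # Repeat and expand to reach target token count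
--     repeated_text = base_text
--     while len(repeated_text.split()) < target_tokens:
--         repeated_text += base_text
--
--     # Trim to approximate target
--     words = repeated_text.split()[:target_tokens]
--     return " ".join(words)
-- ===== SOURCE B (Python) =====
-- # The base prompt is a fixed constant, so its whitespace-split word list is precomputed
-- # as a literal; word i of the repeated-and-trimmed output is simply WORDS[i % 63].
-- WORDS = ['Please', 'analyze', 'the', 'following', 'business', 'scenario', 'in', 'detail.',
--          'Consider', 'all', 'aspects', 'including', 'market', 'conditions,', 'competitive',
--          'landscape,', 'financial', 'implications,', 'operational', 'challenges,', 'strategic',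
--          'opportunities,', 'risk', 'factors,', 'and', 'potential', 'outcomes.', 'Provide', 'a',
--          'comprehensive', 'analysis', 'with', 'specific', 'recommendations.', 'The', 'scenario',
--          'involves', 'a', 'technology', 'startup', 'that', 'has', 'developed', 'an', 'innovative',
--          'AI-powered', 'solution', 'for', 'healthcare', 'diagnostics.', 'The', 'company', 'has',
--          'completed', 'initial', 'testing', 'and', 'is', 'now', 'considering', 'various',
--          'go-to-market', 'strategies.']
--
-- def create_long_prompt(target_tokens: int) -> str:
--     n = len(WORDS)
--     return " ".join(WORDS[i % n] for i in range(target_tokens))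
-- ===== Notes on version B (the rewrite author's own statement) =====
-- stated objective: faster
-- what changed: B precomputes the constant base text's word list once as a literal and emits output word i as WORDS[i % 63] over a single range(target) pass, instead of A's loop that keeps appending the base text and re-splitting the ever-growing string before a final split-and-slice.
-- intended difference: For -62 <= target_tokens <= -1 A's negative-stop slice words[:target_tokens] accidentally returns the base text minus its last |target_tokens| words, while B returns the empty string, the intended result for a non-positive target word count. — e.g. on create_long_prompt(-1): A returns "Please analyze the following business scenario in detail. Consider all aspects including market conditions, competitiv…, B returns ""
import Mathlib
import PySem

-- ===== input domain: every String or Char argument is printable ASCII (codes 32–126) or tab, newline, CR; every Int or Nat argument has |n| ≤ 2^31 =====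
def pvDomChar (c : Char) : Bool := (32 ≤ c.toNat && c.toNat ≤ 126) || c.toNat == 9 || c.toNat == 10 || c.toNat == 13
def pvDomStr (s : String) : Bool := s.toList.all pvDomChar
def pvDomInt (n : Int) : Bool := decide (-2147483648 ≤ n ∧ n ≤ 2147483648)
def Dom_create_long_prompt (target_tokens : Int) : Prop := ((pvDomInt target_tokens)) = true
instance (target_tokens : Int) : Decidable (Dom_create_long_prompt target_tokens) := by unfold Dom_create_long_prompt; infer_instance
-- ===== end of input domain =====

-- B precomputes the constant base text's word list as a literal and emits output word i
-- as WORDS[i % 63] in one pass over range(target), replacing A's append-and-resplit loop (faster, asymptotic).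
-- On -62 ≤ target_tokens ≤ -1 B intentionally returns "" where A's negative-stop slice returns a truncated base text (see D_ below).

-- ===== PORT A =====
def pvBaseTailChars : List Char :=
  [' ', ' ', ' ', ' ', 'P', 'l', 'e', 'a', 's', 'e', ' ', 'a', 'n', 'a', 'l', 'y', 'z', 'e', ' ', 't', 'h', 'e', ' ', 'f', 'o', 'l', 'l', 'o', 'w', 'i', 'n', 'g', ' ', 'b', 'u', 's', 'i', 'n', 'e', 's', 's', ' ', 's', 'c', 'e', 'n', 'a', 'r', 'i', 'o', ' ', 'i', 'n', ' ', 'd', 'e', 't', 'a', 'i', 'l', '.', ' ', 'C', 'o', 'n', 's', 'i', 'd', 'e', 'r', ' ', 'a', 'l', 'l', ' ', 'a', 's', 'p', 'e', 'c', 't', 's', ' ', '\n', ' ', ' ', ' ', ' ', 'i', 'n', 'c', 'l', 'u', 'd', 'i', 'n', 'g', ' ', 'm', 'a', 'r', 'k', 'e', 't', ' ', 'c', 'o', 'n', 'd', 'i', 't', 'i', 'o', 'n', 's', ',', ' ', 'c', 'o', 'm', 'p', 'e', 't', 'i', 't', 'i', 'v', 'e', ' ', 'l', 'a', 'n', 'd',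 's', 'c', 'a', 'p', 'e', ',', ' ', 'f', 'i', 'n', 'a', 'n', 'c', 'i', 'a', 'l', ' ', 'i', 'm', 'p', 'l', 'i', 'c', 'a', 't', 'i', 'o', 'n', 's', ',', ' ', '\n', ' ', ' ', ' ', ' ', 'o', 'p', 'e', 'r', 'a', 't', 'i', 'o', 'n', 'a', 'l', ' ', 'c', 'h', 'a', 'l', 'l', 'e', 'n', 'g', 'e', 's', ',', ' ', 's', 't', 'r', 'a', 't', 'e', 'g', 'i', 'c', ' ', 'o', 'p', 'p', 'o', 'r', 't', 'u', 'n', 'i', 't', 'i', 'e', 's', ',', ' ', 'r', 'i', 's', 'k', ' ', 'f', 'a', 'c', 't', 'o', 'r', 's', ',', ' ', 'a', 'n', 'd', ' ', 'p', 'o', 't', 'e', 'n', 't', 'i', 'a', 'l', ' ', '\n', ' ', ' ', ' ', ' ', 'o', 'u', 't', 'c', 'o', 'm', 'e', 's', '.', ' ', 'P', 'r', 'o', 'v', 'i', 'd', 'e', ' ', 'a', ' ', 'c', 'o', 'm', 'p', 'r', 'e', 'h', 'e', 'n', 's', 'i', 'v', 'e', ' ', 'a', 'n', 'a', 'l', 'y',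 's', 'i', 's', ' ', 'w', 'i', 't', 'h', ' ', 's', 'p', 'e', 'c', 'i', 'f', 'i', 'c', ' ', 'r', 'e', 'c', 'o', 'm', 'm', 'e', 'n', 'd', 'a', 't', 'i', 'o', 'n', 's', '.', '\n', '\n', ' ', ' ', ' ', ' ', 'T', 'h', 'e', ' ', 's', 'c', 'e', 'n', 'a', 'r', 'i', 'o', ' ', 'i', 'n', 'v', 'o', 'l', 'v', 'e', 's', ' ', 'a', ' ', 't', 'e', 'c', 'h', 'n', 'o', 'l', 'o', 'g', 'y', ' ', 's', 't', 'a', 'r', 't', 'u', 'p', ' ', 't', 'h', 'a', 't', ' ', 'h', 'a', 's', ' ', 'd', 'e', 'v', 'e', 'l', 'o', 'p', 'e', 'd', ' ', 'a', 'n', ' ', 'i', 'n', 'n', 'o', 'v', 'a', 't', 'i', 'v', 'e', ' ', '\n', ' ', ' ', ' ', ' ', 'A', 'I', '-', 'p', 'o', 'w', 'e', 'r', 'e', 'd', ' ', 's', 'o', 'l', 'u', 't', 'i', 'o', 'n', ' ', 'f', 'o', 'r', ' ', 'h', 'e', 'a', 'l', 't', 'h', 'c', 'a', 'r', 'e', '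 ', 'd', 'i', 'a', 'g', 'n', 'o', 's', 't', 'i', 'c', 's', '.', ' ', 'T', 'h', 'e', ' ', 'c', 'o', 'm', 'p', 'a', 'n', 'y', ' ', 'h', 'a', 's', ' ', 'c', 'o', 'm', 'p', 'l', 'e', 't', 'e', 'd', ' ', '\n', ' ', ' ', ' ', ' ', 'i', 'n', 'i', 't', 'i', 'a', 'l', ' ', 't', 'e', 's', 't', 'i', 'n', 'g', ' ', 'a', 'n', 'd', ' ', 'i', 's', ' ', 'n', 'o', 'w', ' ', 'c', 'o', 'n', 's', 'i', 'd', 'e', 'r', 'i', 'n', 'g', ' ', 'v', 'a', 'r', 'i', 'o', 'u', 's', ' ', 'g', 'o', '-', 't', 'o', '-', 'm', 'a', 'r', 'k', 'e', 't', ' ', 's', 't', 'r', 'a', 't', 'e', 'g', 'i', 'e', 's', '.', '\n', ' ', ' ', ' ', ' ']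

-- the base_text literal of Python A, as its character list
def pvBaseChars : List Char := '\n' :: pvBaseTailChars

-- split₀.go facts, needed by pvLoopA's termination proof (cited in decreasing_by), so they stay above the port
theorem pvGo_acc (ds cur : List Char) (acc : List (List Char)) :
    PySem.Chars.split₀.go ds cur acc = acc.reverse ++ PySem.Chars.split₀.go ds cur [] := by
  induction ds generalizing cur acc with
  | nil => by_cases hc : cur.isEmpty <;> simp [PySem.Chars.split₀.go, hc]
  | cons a ds ih =>
    simp only [PySem.Chars.split₀.go]
    split_ifs with h1 h2
    · exact ih [] acc
    · rw [ih [] (cur.reverse :: acc), ih [] [cur.reverse]]; simp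
    · exact ih (a :: cur) acc

theorem pvGo_append_ws (cs : List Char) (c : Char) (ds cur : List Char) (acc : List (List Char))
    (hc : PySem.Chars.isspace c = true) :
    PySem.Chars.split₀.go (cs ++ c :: ds) cur acc =
      PySem.Chars.split₀.go cs cur acc ++ PySem.Chars.split₀.go ds [] [] := by
  induction cs generalizing cur acc with
  | nil =>
    simp only [List.nil_append, PySem.Chars.split₀.go, hc, if_true]
    split_ifs with h
    · exact pvGo_acc ds [] acc
    · rw [pvGo_acc ds [] (cur.reverse :: acc)]
  | cons a cs ih =>
    simp only [List.cons_append, PySem.Chars.split₀.go]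
    split_ifs with h1 h2 <;> [exact ih [] acc; exact ih [] _; exact ih (a :: cur) acc]

theorem pvSplit_append_base (cs : List Char) :
    PySem.Chars.split₀ (cs ++ pvBaseChars) =
      PySem.Chars.split₀ cs ++ PySem.Chars.split₀ pvBaseChars := by
  unfold pvBaseChars PySem.Chars.split₀
  rw [pvGo_append_ws _ _ _ _ _ (by decide)]
  simp only [PySem.Chars.split₀.go, if_pos (by decide : PySem.Chars.isspace '\n' = true)]
  simp

set_option maxRecDepth 8192 in
set_option maxHeartbeats 1000000 in
theorem pvSplit_base_len : (PySem.Chars.split₀ pvBaseChars).length = 63 := by decide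

def pvLoopA (t : Int) (repeated : List Char) : List Char :=
  if ((PySem.Chars.split₀ repeated).length : Int) < t then
    pvLoopA t (repeated ++ pvBaseChars)
  else repeated
termination_by (t - (PySem.Chars.split₀ repeated).length).toNat
decreasing_by
  rw [pvSplit_append_base, List.length_append, pvSplit_base_len]
  omega

def create_long_prompt (target_tokens : Int) : String :=
  String.ofList (PySem.Chars.join " ".toList
    (PySem.List.slice (PySem.Chars.split₀ (pvLoopA target_tokens pvBaseChars)) none (some target_tokens)))

-- ===== PORT B =====
-- Source B's module constant WORDS: the base text's word list, precomputed as a literal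
def pvWords : List String :=
  ["Please", "analyze", "the", "following", "business", "scenario", "in", "detail.", "Consider", "all", "aspects", "including", "market", "conditions,", "competitive", "landscape,", "financial", "implications,", "operational", "challenges,", "strategic", "opportunities,", "risk", "factors,", "and", "potential", "outcomes.", "Provide", "a", "comprehensive", "analysis", "with", "specific", "recommendations.", "The", "scenario", "involves", "a", "technology", "startup", "that", "has", "developed", "an", "innovative", "AI-powered", "solution", "for", "healthcare", "diagnostics.", "The", "company", "has", "completed", "initial", "testing", "and", "is", "now", "considering", "various", "go-to-market", "strategies."]

-- WORDS[i % n] in Source B: 0 ≤ i % 63 < 63 always, so the pyGetD default is never used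
def create_long_prompt_alt (target_tokens : Int) : String :=
  let n : Int := pvWords.length
  PySem.Str.join " "
    ((PySem.List.pyRange 0 target_tokens 1).map
      (fun i => PySem.List.pyGetD pvWords (PySem.Int.mod i n) ""))

-- ===== PRECONDITION & SPEC =====
-- For -62 ≤ target_tokens ≤ -1 A's negative-stop slice words[:target_tokens] accidentally returns
-- the base text minus its last |target_tokens| words, while B returns "", the intended result for
-- a non-positive target word count.
def D_create_long_prompt (target_tokens : Int) : Prop := -63 < target_tokens ∧ target_tokens < 0
instance (target_tokens : Int) : Decidable (D_create_long_prompt target_tokens) := by unfold D_create_long_prompt; infer_instance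

def Spec_create_long_prompt (target_tokens : Int) (out : String) : Prop :=
  ¬ D_create_long_prompt target_tokens → out = create_long_prompt_alt target_tokens
instance (target_tokens : Int) (out : String) : Decidable (Spec_create_long_prompt target_tokens out) := by unfold Spec_create_long_prompt; infer_instance

def pvDiffWitness_create_long_prompt : Int := (-1)
def pvDiffWitnessOut_create_long_prompt : String × String :=
  ("Please analyze the following business scenario in detail. Consider all aspects including market conditions, competitive landscape, financial implications, operational challenges, strategic opportunities, risk factors, and potential outcomes. Provide a comprehensive analysis with specific recommendations. The scenario involves a technology startup that has developed an innovative AI-powered solution for healthcare diagnostics. The company has completed initial testing and is now considering various go-to-market", "")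

-- ===== CLAIM (what is proved, stated in full; the proofs are below) =====
def Claim_unchanged_create_long_prompt : Prop := ∀ (target_tokens : Int), Dom_create_long_prompt target_tokens → Spec_create_long_prompt target_tokens (create_long_prompt target_tokens)
def Claim_changed_create_long_prompt : Prop := Dom_create_long_prompt (pvDiffWitness_create_long_prompt) ∧ D_create_long_prompt (pvDiffWitness_create_long_prompt) ∧ create_long_prompt (pvDiffWitness_create_long_prompt) = pvDiffWitnessOut_create_long_prompt.1 ∧ create_long_prompt_alt (pvDiffWitness_create_long_prompt) = pvDiffWitnessOut_create_long_prompt.2 ∧ pvDiffWitnessOut_create_long_prompt.1 ≠ pvDiffWitnessOut_create_long_prompt.2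
def Claim_exact_create_long_prompt : Prop := ∀ (target_tokens : Int), Dom_create_long_prompt target_tokens → D_create_long_prompt target_tokens → create_long_prompt target_tokens ≠ create_long_prompt_alt target_tokens

-- ===== LEMMAS AND PROOFS =====

-- the word list of the base text is exactly pvWords
set_option maxRecDepth 8192 in
set_option maxHeartbeats 1000000 in
theorem pvWords_eq : pvWords.map String.toList = PySem.Chars.split₀ pvBaseChars := by decide

-- split₀ of j concatenated copies of the base text is j concatenated copies of its word list
theorem pvSplit_flat (j : Nat) :
    PySem.Chars.split₀ (List.replicate j pvBaseChars).flatten =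
      (List.replicate j (PySem.Chars.split₀ pvBaseChars)).flatten := by
  induction j with
  | zero => decide
  | succ j ih =>
    rw [List.replicate_succ' (n := j), List.replicate_succ' (n := j), List.flatten_append,
        List.flatten_append]
    simp only [List.flatten_cons, List.flatten_nil, List.append_nil]
    rw [pvSplit_append_base, ih]

theorem pvFlat_len (j : Nat) :
    ((List.replicate j (PySem.Chars.split₀ pvBaseChars)).flatten).length = j * 63 := by
  simp [List.length_flatten, pvSplit_base_len, List.map_replicate]

-- if the target is already reached, the loop stops at once
theorem pvLoopA_done (t : Int) (j : Nat) (h : t ≤ 63 * j) :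
    pvLoopA t (List.replicate j pvBaseChars).flatten = (List.replicate j pvBaseChars).flatten := by
  rw [pvLoopA, if_neg]
  rw [pvSplit_flat, pvFlat_len]
  push_cast
  omega

-- otherwise the loop keeps appending until exactly m copies are present, m the ceiling of t/63
theorem pvLoopA_run (t : Int) (m : Nat) (hm : ((m : Int) - 1) * 63 < t ∧ t ≤ (m : Int) * 63) :
    ∀ (j : Nat), 1 ≤ j → 63 * (j : Int) < t →
      pvLoopA t (List.replicate j pvBaseChars).flatten = (List.replicate m pvBaseChars).flatten := by
  intro j
  induction hk : (t - 63 * j).toNat using Nat.strong_induction_on generalizing j with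
  | _ k ih =>
  intro hj hlt
  rw [pvLoopA, if_pos (by rw [pvSplit_flat, pvFlat_len]; push_cast; omega)]
  have hstep : (List.replicate j pvBaseChars).flatten ++ pvBaseChars =
      (List.replicate (j + 1) pvBaseChars).flatten := by
    rw [List.replicate_succ' (n := j), List.flatten_append]; simp
  rw [hstep]
  by_cases hdone : t ≤ 63 * ((j : Int) + 1)
  · have hmj : m = j + 1 := by omega
    subst hmj
    exact pvLoopA_done t (j + 1) (by push_cast; omega)
  · subst hk
    refine ih (t - 63 * ((j : Int) + 1)).toNat ?_ (j + 1) ?_ ?_ ?_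
    · omega
    · push_cast; ring_nf
    · omega
    · push_cast; omega

-- the loop always ends with r ≥ 1 copies of the base text, t ≤ 63·r
set_option maxRecDepth 8192 in
theorem pvLoopA_copies (t : Int) :
    ∃ r : Nat, 1 ≤ r ∧ t ≤ 63 * (r : Int) ∧ (t ≤ 63 → r = 1) ∧
      pvLoopA t pvBaseChars = (List.replicate r pvBaseChars).flatten := by
  have hbase1 : pvBaseChars = (List.replicate 1 pvBaseChars).flatten := by simp
  by_cases h : (63 : Int) < t
  · set r : Int := -(PySem.Int.floordiv (-t) 63) with hr
    have hrb : (r - 1) * 63 < t ∧ t ≤ r * 63 :=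
      (PySem.Int.neg_floordiv_neg_eq_iff_of_pos (a := t) (b := 63) (q := r) (by omega)).mp hr.symm
    have hcast : ((r.toNat : Int)) = r := Int.toNat_of_nonneg (by omega)
    refine ⟨r.toNat, by omega, by omega, by omega, ?_⟩
    rw [hbase1]
    exact pvLoopA_run t r.toNat (by rw [hcast]; exact hrb) 1 (le_refl 1) (by push_cast; omega)
  · refine ⟨1, le_refl 1, by omega, fun _ => rfl, ?_⟩
    rw [hbase1]
    exact pvLoopA_done t 1 (by omega)

-- a prefix of ≤ one copy, written index by index
theorem pvTake_one (ws : List (List Char)) (t : Nat) (ht : t ≤ ws.length) :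
    ws.take t = (List.range t).map (fun k => ws.getD (k % ws.length) []) := by
  apply List.ext_getElem
  · simp; omega
  · intro i h1 h2
    have hi : i < t := by simpa using h2
    have hiw : i < ws.length := by omega
    simp [Nat.mod_eq_of_lt hiw, List.getElem?_eq_getElem hiw]

-- a prefix of r concatenated copies of ws, written index by index (word k is ws[k % len ws])
theorem pvTake_rep (ws : List (List Char)) :
    ∀ (r t : Nat), t ≤ r * ws.length →
      ((List.replicate r ws).flatten).take t =
        (List.range t).map (fun k => ws.getD (k % ws.length) []) := by
  intro r
  induction r with
  | zero => intro t ht; have : t = 0 := by omega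
            subst this; simp
  | succ r ih =>
    intro t ht
    have hmul : (r + 1) * ws.length = r * ws.length + ws.length := by ring
    rw [List.replicate_succ, List.flatten_cons, List.take_append]
    by_cases hsmall : t ≤ ws.length
    · rw [Nat.sub_eq_zero_of_le hsmall]
      simp only [List.take_zero, List.append_nil]
      exact pvTake_one ws t hsmall
    · have hlen : ws.length ≤ t := by omega
      rw [List.take_of_length_le hlen, ih (t - ws.length) (by omega)]
      have hfull : (List.range ws.length).map (fun k => ws.getD (k % ws.length) []) = ws :=
        (pvTake_one ws ws.length (le_refl _)).symm.trans (List.take_of_length_le (le_refl _))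
      have hsplit : t = ws.length + (t - ws.length) := by omega
      conv_rhs => rw [hsplit, List.range_add, List.map_append, List.map_map]
      congr 1
      · exact hfull.symm
      · apply List.map_congr_left
        intro k _
        show ws.getD (k % ws.length) [] = ws.getD ((ws.length + k) % ws.length) []
        rw [Nat.add_mod_left]

-- B's output as a character list
theorem pvAlt_toList (t : Int) :
    (create_long_prompt_alt t).toList =
      PySem.Chars.join " ".toList
        ((PySem.List.pyRange 0 t 1).map
          (fun i => PySem.List.pyGetD (pvWords.map String.toList) (PySem.Int.mod i 63) [])) := by
  unfold create_long_prompt_alt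
  rw [PySem.Str.toList_join, List.map_map]
  congr 1
  apply List.map_congr_left
  intro i _
  show String.toList (PySem.List.pyGetD pvWords (PySem.Int.mod i (pvWords.length : Int)) "") = _
  have : (pvWords.length : Int) = 63 := by decide
  rw [this]
  exact (PySem.List.pyGetD_map String.toList pvWords (PySem.Int.mod i 63) "").symm

-- for non-positive targets B emits nothing
theorem pvAlt_toList_nonpos (t : Int) (ht : t ≤ 0) : (create_long_prompt_alt t).toList = [] := by
  rw [pvAlt_toList, PySem.List.pyRange_one_eq_nil ht]
  decide

-- every word of the base text is nonempty
theorem pvWords_ne_nil : ∀ w ∈ pvWords.map String.toList, w ≠ [] := by decide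

-- a joined nonempty list of nonempty words is nonempty
theorem pvJoin_ne_nil (sep x : List Char) (xs : List (List Char)) (hx : x ≠ []) :
    PySem.Chars.join sep (x :: xs) ≠ [] := by
  cases xs with
  | nil => rw [PySem.Chars.join_singleton]; exact hx
  | cons y ys => rw [PySem.Chars.join_cons_cons]; simp [hx]

-- ===== VERDICT (by name: the statement is the Claim_ definition above) =====
theorem create_long_prompt_spec : Claim_unchanged_create_long_prompt := by
  intro t _ hnD
  apply String.toList_inj.mp
  unfold create_long_prompt
  rw [String.toList_ofList, pvAlt_toList]
  obtain ⟨r, hr1, hrt, hone, hloop⟩ := pvLoopA_copies t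
  rw [hloop, pvSplit_flat]
  by_cases hpos : 0 < t
  · -- positive target: both sides are words 0 … t−1 of the cyclically repeated word list
    rw [PySem.List.slice_to _ (by omega),
        pvTake_rep (PySem.Chars.split₀ pvBaseChars) r t.toNat
          (by rw [pvSplit_base_len]; omega)]
    congr 1
    rw [PySem.List.pyRange_one, List.map_map, sub_zero]
    apply List.map_congr_left
    intro k _
    have hmod : PySem.Int.mod ((0 : Int) + (k : Int)) 63 = ((k % 63 : Nat) : Int) := by
      rw [zero_add]; exact_mod_cast PySem.Int.mod_natCast k 63
    simp only [Function.comp, hmod, PySem.List.pyGetD_natCast, pvWords_eq, pvSplit_base_len]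
  · -- t = 0 or t ≤ −63 (¬D_): both sides are empty
    have hrange : PySem.List.pyRange 0 t 1 = [] := PySem.List.pyRange_one_eq_nil (by omega)
    rw [hrange]
    unfold D_create_long_prompt at hnD
    by_cases hz : t = 0
    · subst hz
      rw [PySem.List.slice_to _ (by omega)]
      simp [PySem.Chars.join]
    · -- t ≤ −63: the negative-stop slice drops at least all 63 words
      have hr1' : r = 1 := hone (by omega)
      subst hr1'
      have hk : t = -(((-t).toNat : Int)) := by omega
      rw [hk, PySem.List.slice_to_neg_natCast _ _ (by omega), pvFlat_len]
      have h0 : 1 * 63 - (-t).toNat = 0 := by omega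
      rw [h0]
      decide

set_option maxRecDepth 8192 in
set_option maxHeartbeats 4000000 in
theorem create_long_prompt_changed : Claim_changed_create_long_prompt := by
  unfold Claim_changed_create_long_prompt
  refine ⟨by decide, by decide, ?_, ?_, by decide⟩
  · show create_long_prompt (-1) = _
    unfold create_long_prompt
    have h1 : pvLoopA (-1) pvBaseChars = pvBaseChars := by
      have := pvLoopA_done (-1) 1 (by norm_num)
      simpa using this
    rw [h1]
    decide
  · show create_long_prompt_alt (-1) = _
    decide

set_option maxRecDepth 8192 in
theorem create_long_prompt_tight : Claim_exact_create_long_prompt := by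
  intro t _ hD
  unfold D_create_long_prompt at hD
  intro h
  have h' := congrArg String.toList h
  rw [pvAlt_toList_nonpos t (by omega)] at h'
  unfold create_long_prompt at h'
  rw [String.toList_ofList] at h'
  obtain ⟨r, hr1, hrt, hone, hloop⟩ := pvLoopA_copies t
  rw [hloop, pvSplit_flat] at h'
  have hk : t = -(((-t).toNat : Int)) := by omega
  rw [hk, PySem.List.slice_to_neg_natCast _ _ (by omega), pvFlat_len] at h'
  -- 1 ≤ r·63 − |t| words remain, the first one nonempty
  have hne : (List.replicate r (PySem.Chars.split₀ pvBaseChars)).flatten.take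
      (r * 63 - (-t).toNat) ≠ [] := by
    have hlen : ((List.replicate r (PySem.Chars.split₀ pvBaseChars)).flatten.take
        (r * 63 - (-t).toNat)).length = r * 63 - (-t).toNat := by
      rw [List.length_take, pvFlat_len]; omega
    intro hnil
    rw [hnil] at hlen
    simp at hlen
    omega
  obtain ⟨x, xs, hxxs⟩ := List.exists_cons_of_ne_nil hne
  rw [hxxs] at h'
  refine pvJoin_ne_nil " ".toList x xs ?_ h'
  have hx : x ∈ (List.replicate r (PySem.Chars.split₀ pvBaseChars)).flatten := by
    have : x ∈ (List.replicate r (PySem.Chars.split₀ pvBaseChars)).flatten.take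
        (r * 63 - (-t).toNat) := by rw [hxxs]; exact List.mem_cons_self
    exact List.mem_of_mem_take this
  obtain ⟨l, hl, hxl⟩ := List.mem_flatten.mp hx
  have hlw : l = PySem.Chars.split₀ pvBaseChars := (List.eq_of_mem_replicate hl)
  subst hlw
  exact pvWords_ne_nil x (by rw [pvWords_eq]; exact hxl)
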